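-- pv_equiv track=rewrite | github.com/rain-zhao/leetcode | py/Task363.py | maxSumSubmatrix2
-- ===== SOURCE A (Python) =====
-- from typing import List
--
-- def maxSumSubmatrix2(matrix: List[List[int]], k: int) -> int:
--     m, n = len(matrix), len(matrix[0])
--     res = -10**5
--     for i in range(1, m+1):
--         for j in range(1, n+1):
--             dp = [[0] * (n+1) for _ in range(m+1)]
--             dp[i][j] = matrix[i-1][j-1]
--             for p in range(i, m+1):
--                 for q in range(j, n+1):
--                     dp[p][q] = dp[p][q-1] + dp[p-1][q] - \
--                         dp[p-1][q-1] + matrix[p-1][q-1]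
--                     if dp[p][q] <= k and dp[p][q] > res:
--                         res = dp[p][q]
--     return res
-- ===== SOURCE B (Python) =====
-- def maxSumSubmatrix2(matrix, k):
--     m, n = len(matrix), len(matrix[0])
--     best = -10**5
--     for top in range(m):
--         col = [0] * n
--         for bot in range(top, m):
--             row = matrix[bot]
--             for q in range(n):
--                 col[q] += row[q]
--             for j in range(n):
--                 s = 0
--                 for q in range(j, n):
--                     s += col[q]
--                     if s <= k and best < s:
--                         best = s
--     return best
-- ===== Notes on version B (the rewrite author's own statement) =====
-- stated objective: faster
-- what changed: Replaces A's per-start-cell (i,j) allocation of a fresh (m+1)x(n+1) 2D partial-sum table with a single row-band sweep: for each top row, column sums are accumulated downward and a running 1-D sum enumerates all column intervals, so no 2D tables are ever built.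
import Mathlib
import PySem

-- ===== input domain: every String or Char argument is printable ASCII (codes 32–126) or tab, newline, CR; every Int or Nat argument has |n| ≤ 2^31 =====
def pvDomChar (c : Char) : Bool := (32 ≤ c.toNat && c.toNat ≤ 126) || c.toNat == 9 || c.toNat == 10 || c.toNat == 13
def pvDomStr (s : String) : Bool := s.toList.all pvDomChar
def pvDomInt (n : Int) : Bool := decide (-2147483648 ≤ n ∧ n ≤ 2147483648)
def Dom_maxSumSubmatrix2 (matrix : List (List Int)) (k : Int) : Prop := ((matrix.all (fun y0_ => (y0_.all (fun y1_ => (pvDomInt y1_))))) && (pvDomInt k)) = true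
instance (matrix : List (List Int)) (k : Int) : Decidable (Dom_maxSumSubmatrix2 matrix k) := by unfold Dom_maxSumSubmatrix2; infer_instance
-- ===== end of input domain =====

-- B replaces A's per-start-cell fresh 2D partial-sum tables by one row-band sweep with O(n)
-- accumulated column sums and a running 1-D interval sum; measurably faster by a constant factor.


-- ===== PORT A =====
-- matrix[p][q] read (indices nonnegative and in range under Pre_); exact via PySem.List.pyGetD
def pvGet2 (dp : List (List Int)) (p q : Int) : Int :=
  PySem.List.pyGetD (PySem.List.pyGetD dp p []) q 0

-- dp[p][q] = v (indices nonnegative and in range); exact via PySem.List.pySetD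
def pvSet2 (dp : List (List Int)) (p q : Int) (v : Int) : List (List Int) :=
  PySem.List.pySetD dp p (PySem.List.pySetD (PySem.List.pyGetD dp p []) q v)

def maxSumSubmatrix2 (matrix : List (List Int)) (k : Int) : Int :=
  let m : Int := matrix.length
  let n : Int := (PySem.List.pyGetD matrix 0 []).length
  (PySem.List.pyRange 1 (m+1) 1).foldl (fun res i =>
    (PySem.List.pyRange 1 (n+1) 1).foldl (fun res j =>
      let dp0 : List (List Int) := List.replicate (m+1).toNat (List.replicate (n+1).toNat (0:Int))
      let dp1 := pvSet2 dp0 i j (pvGet2 matrix (i-1) (j-1))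
      ((PySem.List.pyRange i (m+1) 1).foldl (fun (st : List (List Int) × Int) p =>
        (PySem.List.pyRange j (n+1) 1).foldl (fun (st : List (List Int) × Int) q =>
          let v := pvGet2 st.1 p (q-1) + pvGet2 st.1 (p-1) q - pvGet2 st.1 (p-1) (q-1)
                     + pvGet2 matrix (p-1) (q-1)
          (pvSet2 st.1 p q v, if v ≤ k ∧ v > st.2 then v else st.2)) st) (dp1, res)).2)
      res) (-100000)

-- ===== PORT B =====
def maxSumSubmatrix2_alt (matrix : List (List Int)) (k : Int) : Int :=
  let m : Int := matrix.length
  let n : Int := (PySem.List.pyGetD matrix 0 []).length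
  (PySem.List.pyRange 0 m 1).foldl (fun best top =>
    ((PySem.List.pyRange top m 1).foldl (fun (st : List Int × Int) bot =>
      let row := PySem.List.pyGetD matrix bot []
      let col := (PySem.List.pyRange 0 n 1).foldl (fun col q =>
          PySem.List.pySetD col q (PySem.List.pyGetD col q 0 + PySem.List.pyGetD row q 0)) st.1
      let best := (PySem.List.pyRange 0 n 1).foldl (fun best j =>
          ((PySem.List.pyRange j n 1).foldl (fun (sb : Int × Int) q =>
            let s := sb.1 + PySem.List.pyGetD col q 0
            (s, if s ≤ k ∧ sb.2 < s then s else sb.2)) ((0:Int), best)).2) st.2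
      (col, best)) (List.replicate n.toNat (0:Int), best)).2) (-100000)

-- ===== PRECONDITION & SPEC =====
-- Pre_ excludes exactly the inputs on which the Python A raises IndexError:
-- the empty matrix (matrix[0]) and ragged matrices with a row shorter than row 0.
def Pre_maxSumSubmatrix2 (matrix : List (List Int)) (k : Int) : Prop :=
  matrix ≠ [] ∧ ∀ row ∈ matrix, (matrix.headD []).length ≤ row.length

instance (matrix : List (List Int)) (k : Int) : Decidable (Pre_maxSumSubmatrix2 matrix k) := by
  unfold Pre_maxSumSubmatrix2; infer_instance

def pvWitness_maxSumSubmatrix2 : List (List Int) × Int := ([[1, 0, 1], [0, -2, 3]], 2)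

def Spec_maxSumSubmatrix2 (matrix : List (List Int)) (k : Int) (out : Int) : Prop := out = maxSumSubmatrix2_alt matrix k
instance (matrix : List (List Int)) (k : Int) (out : Int) : Decidable (Spec_maxSumSubmatrix2 matrix k out) := by unfold Spec_maxSumSubmatrix2; infer_instance

-- ===== CLAIM (what is proved, stated in full; the proofs are below) =====
def Claim_equal_maxSumSubmatrix2 : Prop := ∀ (matrix : List (List Int)) (k : Int), Dom_maxSumSubmatrix2 matrix k → Pre_maxSumSubmatrix2 matrix k → Spec_maxSumSubmatrix2 matrix k (maxSumSubmatrix2 matrix k)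

-- ===== LEMMAS AND PROOFS =====

-- running max-with-cap step
def pvStep (k r s : Int) : Int := if s ≤ k ∧ r < s then s else r

-- sum of matrix row r over columns [j, q)
def pvRow (mx : List (List Int)) (r j q : Int) : Int :=
  ((PySem.List.pyRange j q 1).map (fun c => pvGet2 mx r c)).sum

-- sum of matrix column c over rows [i, p)
def pvColS (mx : List (List Int)) (i p c : Int) : Int :=
  ((PySem.List.pyRange i p 1).map (fun r => pvGet2 mx r c)).sum

-- sum of the rectangle rows [i, p) × columns [j, q)
def pvRect (mx : List (List Int)) (i j p q : Int) : Int :=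
  ((PySem.List.pyRange i p 1).map (fun r => pvRow mx r j q)).sum

def pvM (mx : List (List Int)) : Int := (mx.length : Int)
def pvN (mx : List (List Int)) : Int := ((PySem.List.pyGetD mx 0 ([]:List Int)).length : Int)

-- all rectangle sums in A's enumeration order
def pvCandsA (mx : List (List Int)) : List Int :=
  (PySem.List.pyRange 1 (pvM mx + 1) 1).flatMap fun i =>
    (PySem.List.pyRange 1 (pvN mx + 1) 1).flatMap fun j =>
      (PySem.List.pyRange i (pvM mx + 1) 1).flatMap fun p =>
        (PySem.List.pyRange j (pvN mx + 1) 1).map fun q => pvRect mx (i-1) (j-1) p q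

-- all rectangle sums in B's enumeration order
def pvCandsB (mx : List (List Int)) : List Int :=
  (PySem.List.pyRange 0 (pvM mx) 1).flatMap fun top =>
    (PySem.List.pyRange top (pvM mx) 1).flatMap fun bot =>
      (PySem.List.pyRange 0 (pvN mx) 1).flatMap fun j =>
        (PySem.List.pyRange j (pvN mx) 1).map fun q => pvRect mx top j (bot+1) (q+1)

-- ---------- basic rectangle-sum lemmas ----------

theorem pvRow_nil (mx : List (List Int)) (r j q : Int) (h : q ≤ j) : pvRow mx r j q = 0 := by
  simp [pvRow, PySem.List.pyRange_one_eq_nil h]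

theorem pvRow_succ (mx : List (List Int)) (r j q : Int) (h : j ≤ q) :
    pvRow mx r j (q+1) = pvRow mx r j q + pvGet2 mx r q := by
  simp [pvRow, PySem.List.pyRange_one_succ_right h]

theorem pvRect_nil (mx : List (List Int)) (i j p q : Int) (h : p ≤ i) : pvRect mx i j p q = 0 := by
  simp [pvRect, PySem.List.pyRange_one_eq_nil h]

theorem pvRect_row_nil (mx : List (List Int)) (i j p q : Int) (h : q ≤ j) : pvRect mx i j p q = 0 := by
  refine List.sum_eq_zero ?_
  intro x hx
  rcases List.mem_map.1 hx with ⟨r, _, rfl⟩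
  exact pvRow_nil mx r j q h

theorem pvRect_succ_row (mx : List (List Int)) (i j p q : Int) (h : i ≤ p) :
    pvRect mx i j (p+1) q = pvRect mx i j p q + pvRow mx p j q := by
  simp [pvRect, PySem.List.pyRange_one_succ_right h]

theorem pvRect_succ_col (mx : List (List Int)) (i j p q : Int) (h : j ≤ q) :
    pvRect mx i j p (q+1) = pvRect mx i j p q + pvColS mx i p q := by
  unfold pvRect pvColS
  rw [show ((PySem.List.pyRange i p 1).map (fun r => pvRow mx r j (q+1)))
        = ((PySem.List.pyRange i p 1).map (fun r => pvRow mx r j q + pvGet2 mx r q)) from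
      List.map_congr_left (fun r _ => pvRow_succ mx r j q h)]
  exact PySem.List.sum_map_add_int _ _ _

theorem pvRect_rec (mx : List (List Int)) (i j p q : Int) (hi : i < p) (hj : j < q) :
    pvRect mx i j p q =
      pvRect mx i j p (q-1) + pvRect mx i j (p-1) q - pvRect mx i j (p-1) (q-1)
        + pvGet2 mx (p-1) (q-1) := by
  have h1 := pvRect_succ_row mx i j (p-1) q (by omega)
  have h2 := pvRect_succ_row mx i j (p-1) (q-1) (by omega)
  have h3 := pvRow_succ mx (p-1) j (q-1) (by omega)
  rw [show p - 1 + 1 = p from by omega] at h1 h2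
  rw [show q - 1 + 1 = q from by omega] at h3
  linarith

theorem pvRect_cell (mx : List (List Int)) (i j : Int) :
    pvRect mx i j (i+1) (j+1) = pvGet2 mx i j := by
  simp [pvRect, pvRow, PySem.List.pyRange_one_singleton]

-- pvRect as a sum of column sums
theorem pvRect_cols (mx : List (List Int)) (i j p q : Int) (h : j ≤ q) :
    pvRect mx i j p q = ((PySem.List.pyRange j q 1).map (fun c => pvColS mx i p c)).sum := by
  have key : ∀ (t : Nat) (q : Int), j ≤ q → (q - j).toNat = t →
      pvRect mx i j p q = ((PySem.List.pyRange j q 1).map (fun c => pvColS mx i p c)).sum := by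
    intro t
    induction t with
    | zero =>
      intro q hq ht
      have hqj : q = j := by omega
      rw [hqj, pvRect_row_nil mx i j p j le_rfl, PySem.List.pyRange_one_eq_nil le_rfl]
      simp
    | succ t ih =>
      intro q hq ht
      have hq1 : j ≤ q - 1 := by omega
      rw [show q = (q-1)+1 from by omega, pvRect_succ_col mx i j p (q-1) hq1,
        PySem.List.pyRange_one_succ_right hq1, List.map_append, List.sum_append,
        ih (q-1) hq1 (by omega)]
      simp
  exact key _ q h rfl

-- ---------- indexing helpers ----------

theorem pvGetSetG {β : Type} (xs : List β) (d : β) (a c : Int) (v : β)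
    (h0a : 0 ≤ a) (hal : a < (xs.length : Int)) (h0c : 0 ≤ c) :
    PySem.List.pyGetD (PySem.List.pySetD xs a v) c d
      = if c = a then v else PySem.List.pyGetD xs c d := by
  have h1 := PySem.List.pyGetD_pySetD_natCast xs a.toNat c.toNat v d (by omega)
  rw [Int.toNat_of_nonneg h0a, Int.toNat_of_nonneg h0c] at h1
  rw [h1]
  by_cases hca : c = a
  · rw [if_pos (by omega), if_pos hca]
  · rw [if_neg (by omega), if_neg hca]

theorem pvGetD_replicate {β : Type} (men : Nat) (x : β) (d : β) (c : Int) (h : 0 ≤ c) :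
    PySem.List.pyGetD (List.replicate men x) c d = if c < (men:Int) then x else d := by
  have h1 := PySem.List.pyGetD_natCast (List.replicate men x) c.toNat d
  rw [Int.toNat_of_nonneg h] at h1
  rw [h1]
  by_cases hc : c < (men:Int)
  · rw [if_pos hc, List.getD_replicate x (by omega : c.toNat < men)]
  · rw [if_neg hc, List.getD_eq_default]
    simp; omega

-- ---------- A-side dp-table invariant ----------

-- cells already holding their final partial-sum value when the inner loops are at (p, q)
def pvW (i j p q p' q' : Int) : Bool :=
  i ≤ p' && j ≤ q' && (p' < p || (p' == p && q' < q) || (p' == i && q' == j))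

def pvInv (mx : List (List Int)) (i j p q : Int) (dp : List (List Int)) : Prop :=
  dp.length = mx.length + 1 ∧
  (∀ row ∈ dp, (row.length : Int) = pvN mx + 1) ∧
  ∀ p' q' : Int, 0 ≤ p' → p' ≤ pvM mx → 0 ≤ q' → q' ≤ pvN mx →
    pvGet2 dp p' q' = if pvW i j p q p' q' then pvRect mx (i-1) (j-1) p' q' else 0

theorem pvGet2_pvSet2 (dp : List (List Int)) (p q p' q' v : Int)
    (h0p : 0 ≤ p) (hpl : p < (dp.length : Int))
    (h0q : 0 ≤ q) (hql : q < ((PySem.List.pyGetD dp p ([]:List Int)).length : Int))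
    (h0p' : 0 ≤ p') (h0q' : 0 ≤ q') :
    pvGet2 (pvSet2 dp p q v) p' q' = if p' = p ∧ q' = q then v else pvGet2 dp p' q' := by
  unfold pvGet2 pvSet2
  rw [pvGetSetG dp [] p p' _ h0p hpl h0p']
  by_cases hp : p' = p
  · rw [if_pos hp]
    rw [pvGetSetG (PySem.List.pyGetD dp p []) 0 q q' v h0q hql h0q']
    by_cases hq : q' = q
    · rw [if_pos hq, if_pos ⟨hp, hq⟩]
    · rw [if_neg hq, if_neg (by tauto), hp]
  · rw [if_neg hp, if_neg (by tauto)]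

theorem pvInv_read1 (mx : List (List Int)) (i j p q : Int) (dp : List (List Int))
    (h : pvInv mx i j p q dp) (hi : 1 ≤ i) (hip : i ≤ p) (hpm : p ≤ pvM mx)
    (hj : 1 ≤ j) (hjq : j ≤ q) (hqn : q ≤ pvN mx) :
    pvGet2 dp p (q-1) = pvRect mx (i-1) (j-1) p (q-1) := by
  obtain ⟨hlen, hrow, hval⟩ := h
  rw [hval p (q-1) (by omega) (by omega) (by omega) (by omega)]
  by_cases hc : j ≤ q - 1
  · rw [if_pos (by simp [pvW]; omega)]
  · rw [if_neg (by simp [pvW]; omega), pvRect_row_nil mx _ _ _ _ (by omega : q-1 ≤ j-1)]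

theorem pvInv_read2 (mx : List (List Int)) (i j p q : Int) (dp : List (List Int))
    (h : pvInv mx i j p q dp) (hi : 1 ≤ i) (hip : i ≤ p) (hpm : p ≤ pvM mx)
    (hj : 1 ≤ j) (hjq : j ≤ q) (hqn : q ≤ pvN mx) :
    pvGet2 dp (p-1) q = pvRect mx (i-1) (j-1) (p-1) q := by
  obtain ⟨hlen, hrow, hval⟩ := h
  rw [hval (p-1) q (by omega) (by omega) (by omega) (by omega)]
  by_cases hc : i ≤ p - 1
  · rw [if_pos (by simp [pvW]; omega)]
  · rw [if_neg (by simp [pvW]; omega), pvRect_nil mx _ _ _ _ (by omega : p-1 ≤ i-1)]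

theorem pvInv_read3 (mx : List (List Int)) (i j p q : Int) (dp : List (List Int))
    (h : pvInv mx i j p q dp) (hi : 1 ≤ i) (hip : i ≤ p) (hpm : p ≤ pvM mx)
    (hj : 1 ≤ j) (hjq : j ≤ q) (hqn : q ≤ pvN mx) :
    pvGet2 dp (p-1) (q-1) = pvRect mx (i-1) (j-1) (p-1) (q-1) := by
  obtain ⟨hlen, hrow, hval⟩ := h
  rw [hval (p-1) (q-1) (by omega) (by omega) (by omega) (by omega)]
  by_cases hc : i ≤ p - 1 ∧ j ≤ q - 1
  · rw [if_pos (by simp [pvW]; omega)]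
  · rw [if_neg (by simp [pvW]; omega)]
    by_cases hc2 : i ≤ p - 1
    · rw [pvRect_row_nil mx _ _ _ _ (by omega : q-1 ≤ j-1)]
    · rw [pvRect_nil mx _ _ _ _ (by omega : p-1 ≤ i-1)]

theorem pvInv_write (mx : List (List Int)) (i j p q : Int) (dp : List (List Int))
    (h : pvInv mx i j p q dp) (hi : 1 ≤ i) (hip : i ≤ p) (hpm : p ≤ pvM mx)
    (hj : 1 ≤ j) (hjq : j ≤ q) (hqn : q ≤ pvN mx) :
    pvInv mx i j p (q+1) (pvSet2 dp p q (pvRect mx (i-1) (j-1) p q)) := by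
  obtain ⟨hlen, hrow, hval⟩ := h
  have hpl : p < (dp.length : Int) := by rw [hlen]; unfold pvM at hpm; push_cast; omega
  have hmem : PySem.List.pyGetD dp p ([]:List Int) ∈ dp :=
    PySem.List.pyGetD_mem dp [] ⟨by omega, by omega⟩
  have hql : q < ((PySem.List.pyGetD dp p ([]:List Int)).length : Int) := by
    rw [hrow _ hmem]; omega
  refine ⟨?_, ?_, ?_⟩
  · unfold pvSet2; rw [PySem.List.length_pySetD]; exact hlen
  · intro row hmemr
    unfold pvSet2 at hmemr
    rw [PySem.List.pySetD_of_nonneg _ _ (by omega : (0:Int) ≤ p)] at hmemr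
    rcases List.mem_or_eq_of_mem_set hmemr with h1 | h1
    · exact hrow _ h1
    · rw [h1, PySem.List.length_pySetD]; exact hrow _ hmem
  · intro p' q' h1 h2 h3 h4
    rw [pvGet2_pvSet2 dp p q p' q' _ (by omega) hpl (by omega) hql h1 h3]
    by_cases hpq : p' = p ∧ q' = q
    · rw [if_pos hpq, if_pos (by simp [pvW]; omega), hpq.1, hpq.2]
    · rw [if_neg hpq, hval p' q' h1 h2 h3 h4]
      by_cases hw : pvW i j p q p' q' = true
      · rw [if_pos hw, if_pos (by simp [pvW] at hw ⊢; omega)]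
      · rw [if_neg hw, if_neg (by simp [pvW] at hw ⊢; omega)]

theorem pvInv_nextrow (mx : List (List Int)) (i j p : Int) (dp : List (List Int))
    (h : pvInv mx i j p (pvN mx + 1) dp) (hj : 1 ≤ j) :
    pvInv mx i j (p+1) j dp := by
  obtain ⟨hlen, hrow, hval⟩ := h
  refine ⟨hlen, hrow, ?_⟩
  intro p' q' h1 h2 h3 h4
  rw [hval p' q' h1 h2 h3 h4]
  by_cases hw : pvW i j p (pvN mx + 1) p' q' = true
  · rw [if_pos hw, if_pos (by simp [pvW] at hw ⊢; omega)]
  · rw [if_neg hw, if_neg (by simp [pvW] at hw ⊢; omega)]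

theorem pvInv_init (mx : List (List Int)) (i j : Int)
    (hi : 1 ≤ i) (him : i ≤ pvM mx) (hj : 1 ≤ j) (hjn : j ≤ pvN mx) :
    pvInv mx i j i j
      (pvSet2 (List.replicate (pvM mx + 1).toNat (List.replicate (pvN mx + 1).toNat (0:Int)))
        i j (pvGet2 mx (i-1) (j-1))) := by
  have hN0 : 0 ≤ pvN mx := by unfold pvN; positivity
  have hM0 : 0 ≤ pvM mx := by unfold pvM; positivity
  have hlen0 : ((List.replicate (pvM mx + 1).toNat (List.replicate (pvN mx + 1).toNat (0:Int))).length : Int)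
      = pvM mx + 1 := by simp; omega
  have hrowget : PySem.List.pyGetD
      (List.replicate (pvM mx + 1).toNat (List.replicate (pvN mx + 1).toNat (0:Int))) i ([]:List Int)
      = List.replicate (pvN mx + 1).toNat (0:Int) := by
    rw [pvGetD_replicate _ _ _ i (by omega), if_pos (by omega)]
  refine ⟨?_, ?_, ?_⟩
  · unfold pvSet2; rw [PySem.List.length_pySetD]; simp [pvM]
  · intro row hmemr
    unfold pvSet2 at hmemr
    rw [PySem.List.pySetD_of_nonneg _ _ (by omega : (0:Int) ≤ i)] at hmemr
    rcases List.mem_or_eq_of_mem_set hmemr with h1 | h1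
    · rcases List.eq_of_mem_replicate h1 with rfl
      simp; omega
    · rw [h1, PySem.List.length_pySetD, hrowget]; simp; omega
  · intro p' q' h1 h2 h3 h4
    rw [pvGet2_pvSet2 _ i j p' q' _ (by omega) (by omega) (by omega)
      (by rw [hrowget]; simp; omega) h1 h3]
    by_cases hpq : p' = i ∧ q' = j
    · rw [if_pos hpq, if_pos (by simp [pvW]; omega), hpq.1, hpq.2]
      have hc := pvRect_cell mx (i-1) (j-1)
      rw [show i-1+1 = i from by omega, show j-1+1 = j from by omega] at hc
      exact hc.symm
    · rw [if_neg hpq, if_neg (by simp [pvW]; omega)]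
      unfold pvGet2
      rw [pvGetD_replicate _ _ _ p' (by omega), if_pos (by omega),
        pvGetD_replicate _ _ _ q' (by omega), if_pos (by omega)]

-- ---------- A-side loop characterizations ----------

-- the inner q-loop body of port A, named for the proofs (definitionally the port's lambda)
def pvQbody (mx : List (List Int)) (k p : Int) (st : List (List Int) × Int) (q : Int) :
    List (List Int) × Int :=
  (pvSet2 st.1 p q (pvGet2 st.1 p (q-1) + pvGet2 st.1 (p-1) q - pvGet2 st.1 (p-1) (q-1)
      + pvGet2 mx (p-1) (q-1)),
   if (pvGet2 st.1 p (q-1) + pvGet2 st.1 (p-1) q - pvGet2 st.1 (p-1) (q-1)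
      + pvGet2 mx (p-1) (q-1)) ≤ k ∧
      (pvGet2 st.1 p (q-1) + pvGet2 st.1 (p-1) q - pvGet2 st.1 (p-1) (q-1)
      + pvGet2 mx (p-1) (q-1)) > st.2
   then (pvGet2 st.1 p (q-1) + pvGet2 st.1 (p-1) q - pvGet2 st.1 (p-1) (q-1)
      + pvGet2 mx (p-1) (q-1)) else st.2)

theorem pvQloop (mx : List (List Int)) (k i j p : Int)
    (hi : 1 ≤ i) (hip : i ≤ p) (hpm : p ≤ pvM mx) (hj : 1 ≤ j) (hjn : j ≤ pvN mx) :
    ∀ (t : Nat) (q : Int), j ≤ q → q ≤ pvN mx + 1 → (pvN mx + 1 - q).toNat = t →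
    ∀ (dp : List (List Int)) (r : Int), pvInv mx i j p q dp →
    pvInv mx i j p (pvN mx + 1)
      (((PySem.List.pyRange q (pvN mx + 1) 1).foldl (pvQbody mx k p) (dp, r)).1) ∧
    (((PySem.List.pyRange q (pvN mx + 1) 1).foldl (pvQbody mx k p) (dp, r)).2
      = ((PySem.List.pyRange q (pvN mx + 1) 1).map
          (fun q' => pvRect mx (i-1) (j-1) p q')).foldl (pvStep k) r) := by
  intro t
  induction t with
  | zero =>
    intro q hq1 hq2 ht dp r hinv
    rw [PySem.List.pyRange_one_eq_nil (by omega : pvN mx + 1 ≤ q)]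
    simp only [List.foldl_nil, List.map_nil]
    have hq : q = pvN mx + 1 := by omega
    exact ⟨by rw [hq] at hinv; exact hinv, by trivial⟩
  | succ t ih =>
    intro q hq1 hq2 ht dp r hinv
    rw [PySem.List.pyRange_one_cons (by omega : q < pvN mx + 1)]
    simp only [List.foldl_cons, List.map_cons]
    have hv : pvGet2 dp p (q-1) + pvGet2 dp (p-1) q - pvGet2 dp (p-1) (q-1)
        + pvGet2 mx (p-1) (q-1) = pvRect mx (i-1) (j-1) p q := by
      rw [pvInv_read1 mx i j p q dp hinv hi hip hpm hj hq1 (by omega),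
          pvInv_read2 mx i j p q dp hinv hi hip hpm hj hq1 (by omega),
          pvInv_read3 mx i j p q dp hinv hi hip hpm hj hq1 (by omega)]
      exact (pvRect_rec mx (i-1) (j-1) p q (by omega) (by omega)).symm
    have hbody : pvQbody mx k p (dp, r) q
        = (pvSet2 dp p q (pvRect mx (i-1) (j-1) p q),
           pvStep k r (pvRect mx (i-1) (j-1) p q)) := by
      unfold pvQbody pvStep
      simp only [hv]
    rw [hbody]
    exact ih (q+1) (by omega) (by omega) (by omega) _ _
      (pvInv_write mx i j p q dp hinv hi hip hpm hj hq1 (by omega))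

-- rectangle sums produced by the p/q loops of port A for a fixed start cell (i, j)
def pvCandsP (mx : List (List Int)) (i j p : Int) : List Int :=
  (PySem.List.pyRange p (pvM mx + 1) 1).flatMap fun p' =>
    (PySem.List.pyRange j (pvN mx + 1) 1).map fun q' => pvRect mx (i-1) (j-1) p' q'

theorem pvPloop (mx : List (List Int)) (k i j : Int)
    (hi : 1 ≤ i) (hj : 1 ≤ j) (hjn : j ≤ pvN mx) :
    ∀ (t : Nat) (p : Int), i ≤ p → p ≤ pvM mx + 1 → (pvM mx + 1 - p).toNat = t →
    ∀ (dp : List (List Int)) (r : Int), pvInv mx i j p j dp →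
    (((PySem.List.pyRange p (pvM mx + 1) 1).foldl
        (fun st p' => (PySem.List.pyRange j (pvN mx + 1) 1).foldl (pvQbody mx k p') st)
        (dp, r)).2)
      = (pvCandsP mx i j p).foldl (pvStep k) r := by
  intro t
  induction t with
  | zero =>
    intro p hp1 hp2 ht dp r hinv
    rw [pvCandsP, PySem.List.pyRange_one_eq_nil (by omega : pvM mx + 1 ≤ p)]
    simp
  | succ t ih =>
    intro p hp1 hp2 ht dp r hinv
    obtain ⟨h1, h2⟩ := pvQloop mx k i j p hi hp1 (by omega) hj hjn
      (pvN mx + 1 - j).toNat j le_rfl (by omega) rfl dp r hinv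
    rw [PySem.List.pyRange_one_cons (by omega : p < pvM mx + 1)]
    simp only [List.foldl_cons]
    rw [show ((PySem.List.pyRange j (pvN mx + 1) 1).foldl (pvQbody mx k p) (dp, r))
          = (((PySem.List.pyRange j (pvN mx + 1) 1).foldl (pvQbody mx k p) (dp, r)).1,
             ((PySem.List.pyRange j (pvN mx + 1) 1).foldl (pvQbody mx k p) (dp, r)).2) from rfl,
        ih (p+1) (by omega) (by omega) (by omega) _ _ (pvInv_nextrow mx i j p _ h1 hj), h2]
    conv_rhs => rw [pvCandsP, PySem.List.pyRange_one_cons (by omega : p < pvM mx + 1),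
      List.flatMap_cons, List.foldl_append]
    rfl

theorem pvAchar (mx : List (List Int)) (k : Int) :
    maxSumSubmatrix2 mx k = (pvCandsA mx).foldl (pvStep k) (-100000) := by
  simp only [maxSumSubmatrix2, pvCandsA, pvM, pvN]
  rw [List.foldl_flatMap]
  refine PySem.List.foldl_congr_mem _ _ _ _ ?_
  intro r i hmi
  rw [List.foldl_flatMap]
  refine PySem.List.foldl_congr_mem _ _ _ _ ?_
  intro r' jj hmj
  rw [PySem.List.mem_pyRange_one] at hmi hmj
  have hbody : ((PySem.List.pyRange i ((mx.length:Int)+1) 1).foldl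
      (fun st p' => (PySem.List.pyRange jj (((PySem.List.pyGetD mx 0 ([]:List Int)).length:Int)+1) 1).foldl (pvQbody mx k p') st)
      (pvSet2 (List.replicate ((mx.length:Int)+1).toNat
          (List.replicate ((((PySem.List.pyGetD mx 0 ([]:List Int)).length:Int))+1).toNat (0:Int)))
        i jj (pvGet2 mx (i-1) (jj-1)), r')).2
      = (pvCandsP mx i jj i).foldl (pvStep k) r' := by
    exact pvPloop mx k i jj (by omega) (by omega) (by unfold pvN; omega)
      (pvM mx + 1 - i).toNat i le_rfl (by unfold pvM; omega) rfl _ r'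
      (pvInv_init mx i jj (by omega) (by unfold pvM; omega) (by omega) (by unfold pvN; omega))
  exact hbody

-- ---------- B-side column-sum invariant ----------

def pvColInv (mx : List (List Int)) (top bot : Int) (col : List Int) : Prop :=
  (col.length : Int) = pvN mx ∧
  ∀ c : Int, 0 ≤ c → c < pvN mx → PySem.List.pyGetD col c 0 = pvColS mx top bot c

theorem pvColS_succ (mx : List (List Int)) (top bot c : Int) (h : top ≤ bot) :
    pvColS mx top (bot+1) c = pvColS mx top bot c + pvGet2 mx bot c := by
  simp [pvColS, PySem.List.pyRange_one_succ_right h]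

theorem pvColS_nil (mx : List (List Int)) (top bot c : Int) (h : bot ≤ top) :
    pvColS mx top bot c = 0 := by
  simp [pvColS, PySem.List.pyRange_one_eq_nil h]

-- one accumulation pass col[q] += matrix[bot][q]
theorem pvColPass (mx : List (List Int)) (bot : Int) :
    ∀ (t : Nat) (a : Int), 0 ≤ a → a ≤ pvN mx → (pvN mx - a).toNat = t →
    ∀ col : List Int, (col.length : Int) = pvN mx →
    (((PySem.List.pyRange a (pvN mx) 1).foldl
        (fun c q => PySem.List.pySetD c q (PySem.List.pyGetD c q 0
          + PySem.List.pyGetD (PySem.List.pyGetD mx bot ([]:List Int)) q 0)) col).length : Int)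
      = pvN mx ∧
    ∀ c : Int, 0 ≤ c → c < pvN mx →
      PySem.List.pyGetD ((PySem.List.pyRange a (pvN mx) 1).foldl
        (fun c q => PySem.List.pySetD c q (PySem.List.pyGetD c q 0
          + PySem.List.pyGetD (PySem.List.pyGetD mx bot ([]:List Int)) q 0)) col) c 0
      = if a ≤ c then PySem.List.pyGetD col c 0 + pvGet2 mx bot c
        else PySem.List.pyGetD col c 0 := by
  intro t
  induction t with
  | zero =>
    intro a h0 hn ht col hlen
    rw [PySem.List.pyRange_one_eq_nil (by omega : pvN mx ≤ a)]
    refine ⟨hlen, ?_⟩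
    intro c hc0 hcn
    rw [if_neg (by omega)]
    rfl
  | succ t ih =>
    intro a h0 hn ht col hlen
    rw [PySem.List.pyRange_one_cons (by omega : a < pvN mx)]
    simp only [List.foldl_cons]
    obtain ⟨ih1, ih2⟩ := ih (a+1) (by omega) (by omega) (by omega)
      (PySem.List.pySetD col a (PySem.List.pyGetD col a 0
        + PySem.List.pyGetD (PySem.List.pyGetD mx bot ([]:List Int)) a 0))
      (by rw [PySem.List.length_pySetD]; exact hlen)
    refine ⟨ih1, ?_⟩
    intro c hc0 hcn
    rw [ih2 c hc0 hcn]
    have hset := pvGetSetG col 0 a c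
      (PySem.List.pyGetD col a 0 + PySem.List.pyGetD (PySem.List.pyGetD mx bot ([]:List Int)) a 0)
      h0 (by omega) hc0
    by_cases hac : a + 1 ≤ c
    · rw [if_pos hac, if_pos (by omega), hset, if_neg (by omega)]
    · by_cases hec : c = a
      · rw [if_neg (by omega), if_pos (by omega), hset, if_pos hec, hec]
        rfl
      · rw [if_neg (by omega), if_neg (by omega), hset, if_neg hec]

theorem pvColInv_step (mx : List (List Int)) (top bot : Int) (col : List Int)
    (h : pvColInv mx top bot col) (htb : top ≤ bot) :
    pvColInv mx top (bot+1)
      ((PySem.List.pyRange 0 (pvN mx) 1).foldl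
        (fun c q => PySem.List.pySetD c q (PySem.List.pyGetD c q 0
          + PySem.List.pyGetD (PySem.List.pyGetD mx bot ([]:List Int)) q 0)) col) := by
  obtain ⟨hlen, hval⟩ := h
  have hN0 : 0 ≤ pvN mx := by unfold pvN; positivity
  obtain ⟨h1, h2⟩ := pvColPass mx bot (pvN mx).toNat 0 le_rfl hN0 (by omega) col hlen
  refine ⟨h1, ?_⟩
  intro c hc0 hcn
  rw [h2 c hc0 hcn, if_pos hc0, hval c hc0 hcn, pvColS_succ mx top bot c htb]

theorem pvColInv_init (mx : List (List Int)) (top : Int) :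
    pvColInv mx top top (List.replicate (pvN mx).toNat (0:Int)) := by
  have hN0 : 0 ≤ pvN mx := by unfold pvN; positivity
  refine ⟨by simp; omega, ?_⟩
  intro c hc0 hcn
  rw [pvGetD_replicate _ _ _ c hc0, if_pos (by omega), pvColS_nil mx top top c le_rfl]

-- the inner q-scan body of port B, named for the proofs (definitionally the port's lambda)
def pvSbody (k : Int) (col : List Int) (sb : Int × Int) (q : Int) : Int × Int :=
  (sb.1 + PySem.List.pyGetD col q 0,
   if sb.1 + PySem.List.pyGetD col q 0 ≤ k ∧ sb.2 < sb.1 + PySem.List.pyGetD col q 0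
   then sb.1 + PySem.List.pyGetD col q 0 else sb.2)

theorem pvQscan (k : Int) (col : List Int) (n j : Int) :
    ∀ (t : Nat) (q : Int), j ≤ q → q ≤ n → (n - q).toNat = t → ∀ (s best : Int),
    s = ((PySem.List.pyRange j q 1).map (fun c => PySem.List.pyGetD col c 0)).sum →
    ((PySem.List.pyRange q n 1).foldl (pvSbody k col) (s, best)).2
      = ((PySem.List.pyRange q n 1).map
          (fun q' => ((PySem.List.pyRange j (q'+1) 1).map
            (fun c => PySem.List.pyGetD col c 0)).sum)).foldl (pvStep k) best := by
  intro t
  induction t with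
  | zero =>
    intro q hq1 hq2 ht s best hs
    rw [PySem.List.pyRange_one_eq_nil (by omega : n ≤ q)]
    rfl
  | succ t ih =>
    intro q hq1 hq2 ht s best hs
    rw [PySem.List.pyRange_one_cons (by omega : q < n)]
    simp only [List.foldl_cons, List.map_cons]
    have hs' : s + PySem.List.pyGetD col q 0
        = ((PySem.List.pyRange j (q+1) 1).map (fun c => PySem.List.pyGetD col c 0)).sum := by
      rw [PySem.List.pyRange_one_succ_right hq1, List.map_append, List.sum_append, hs]
      simp
    have hbody : pvSbody k col (s, best) q
        = (((PySem.List.pyRange j (q+1) 1).map (fun c => PySem.List.pyGetD col c 0)).sum,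
           pvStep k best ((PySem.List.pyRange j (q+1) 1).map
             (fun c => PySem.List.pyGetD col c 0)).sum) := by
      unfold pvSbody pvStep
      simp only [hs']
    rw [hbody]
    exact ih (q+1) (by omega) (by omega) (by omega) _ _ rfl

-- rectangle sums produced for one bottom row `bot` of the band starting at `top`
def pvCandsBJ (mx : List (List Int)) (top bot : Int) : List Int :=
  (PySem.List.pyRange 0 (pvN mx) 1).flatMap fun j =>
    (PySem.List.pyRange j (pvN mx) 1).map fun q => pvRect mx top j (bot+1) (q+1)

theorem pvJloop (mx : List (List Int)) (k top bot : Int) (col : List Int)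
    (h : pvColInv mx top (bot+1) col) (best : Int) :
    (PySem.List.pyRange 0 (pvN mx) 1).foldl
      (fun best j => ((PySem.List.pyRange j (pvN mx) 1).foldl (pvSbody k col) ((0:Int), best)).2)
      best
    = (pvCandsBJ mx top bot).foldl (pvStep k) best := by
  unfold pvCandsBJ
  rw [List.foldl_flatMap]
  refine PySem.List.foldl_congr_mem _ _ _ _ ?_
  intro acc jj hmj
  rw [PySem.List.mem_pyRange_one] at hmj
  rw [pvQscan k col (pvN mx) jj (pvN mx - jj).toNat jj le_rfl (by omega) rfl 0 acc
    (by rw [PySem.List.pyRange_one_eq_nil le_rfl]; simp)]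
  refine congrArg _ (List.map_congr_left ?_)
  intro q' hq'
  rw [PySem.List.mem_pyRange_one] at hq'
  obtain ⟨hlen, hval⟩ := h
  rw [pvRect_cols mx top jj (bot+1) (q'+1) (by omega)]
  refine congrArg List.sum (List.map_congr_left ?_)
  intro c hc
  rw [PySem.List.mem_pyRange_one] at hc
  exact hval c (by omega) (by omega)

-- the bot-loop body of port B, named for the proofs (definitionally the port's lambda)
def pvBbody (mx : List (List Int)) (k : Int) (st : List Int × Int) (bot : Int) :
    List Int × Int :=
  let col := (PySem.List.pyRange 0 (pvN mx) 1).foldl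
    (fun c q => PySem.List.pySetD c q (PySem.List.pyGetD c q 0
      + PySem.List.pyGetD (PySem.List.pyGetD mx bot ([]:List Int)) q 0)) st.1
  (col, (PySem.List.pyRange 0 (pvN mx) 1).foldl
    (fun best j => ((PySem.List.pyRange j (pvN mx) 1).foldl (pvSbody k col) ((0:Int), best)).2)
    st.2)

theorem pvBotLoop (mx : List (List Int)) (k top : Int) (h0 : 0 ≤ top) :
    ∀ (t : Nat) (bot : Int), top ≤ bot → bot ≤ pvM mx → (pvM mx - bot).toNat = t →
    ∀ (col : List Int) (best : Int), pvColInv mx top bot col →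
    ((PySem.List.pyRange bot (pvM mx) 1).foldl (pvBbody mx k) (col, best)).2
      = ((PySem.List.pyRange bot (pvM mx) 1).flatMap
          (fun b => pvCandsBJ mx top b)).foldl (pvStep k) best := by
  intro t
  induction t with
  | zero =>
    intro bot h1 h2 ht col best hinv
    rw [PySem.List.pyRange_one_eq_nil (by omega : pvM mx ≤ bot)]
    rfl
  | succ t ih =>
    intro bot h1 h2 ht col best hinv
    rw [PySem.List.pyRange_one_cons (by omega : bot < pvM mx)]
    simp only [List.foldl_cons, List.flatMap_cons, List.foldl_append]
    have hcol' := pvColInv_step mx top bot col hinv h1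
    have hjl := pvJloop mx k top bot _ hcol' best
    show ((PySem.List.pyRange (bot+1) (pvM mx) 1).foldl (pvBbody mx k) (pvBbody mx k (col, best) bot)).2 = _
    rw [show pvBbody mx k (col, best) bot
          = ((pvBbody mx k (col, best) bot).1, (pvBbody mx k (col, best) bot).2) from rfl,
        show (pvBbody mx k (col, best) bot).2
          = (pvCandsBJ mx top bot).foldl (pvStep k) best from hjl]
    exact ih (bot+1) (by omega) (by omega) (by omega) _ _ hcol'

theorem pvBchar (mx : List (List Int)) (k : Int) :
    maxSumSubmatrix2_alt mx k = (pvCandsB mx).foldl (pvStep k) (-100000) := by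
  simp only [maxSumSubmatrix2_alt, pvCandsB, pvM, pvN]
  rw [List.foldl_flatMap]
  refine PySem.List.foldl_congr_mem _ _ _ _ ?_
  intro acc top hmt
  rw [PySem.List.mem_pyRange_one] at hmt
  exact pvBotLoop mx k top (by omega) (pvM mx - top).toNat top le_rfl (by unfold pvM; omega)
    rfl _ acc (pvColInv_init mx top)

-- ---------- the best-so-far fold depends only on which values occur ----------

theorem pvStep_eq_max (k r s : Int) : pvStep k r s = if s ≤ k then max r s else r := by
  unfold pvStep; split_ifs <;> omega

theorem pvFoldlStep_filter (k : Int) (l : List Int) (r : Int) :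
    l.foldl (pvStep k) r = (l.filter (fun s => decide (s ≤ k))).foldl max r := by
  rw [show pvStep k = fun r s => if s ≤ k then max r s else r from
    funext fun r => funext fun s => pvStep_eq_max k r s]
  exact PySem.List.foldl_ite_eq_foldl_filter (fun s => s ≤ k) max l r

theorem pvFoldlMax_le (l1 l2 : List Int) (r : Int) (h : ∀ x ∈ l1, x ∈ l2) :
    l1.foldl max r ≤ l2.foldl max r := by
  rcases PySem.List.foldl_max_mem l1 r with h1 | h1
  · rw [h1]; exact (PySem.List.le_foldl_max l2 r).1
  · exact (PySem.List.le_foldl_max l2 r).2 _ (h _ h1)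

theorem pvFoldlStep_ext (k : Int) (l1 l2 : List Int) (r : Int)
    (h : ∀ x, x ∈ l1 ↔ x ∈ l2) : l1.foldl (pvStep k) r = l2.foldl (pvStep k) r := by
  rw [pvFoldlStep_filter, pvFoldlStep_filter]
  refine le_antisymm (pvFoldlMax_le _ _ _ ?_) (pvFoldlMax_le _ _ _ ?_) <;>
    · intro x hx
      rw [List.mem_filter] at hx ⊢
      first
        | exact ⟨(h x).mp hx.1, hx.2⟩
        | exact ⟨(h x).mpr hx.1, hx.2⟩

-- both programs enumerate exactly the nonempty-rectangle sums
theorem pvCands_ext (mx : List (List Int)) : ∀ x, x ∈ pvCandsA mx ↔ x ∈ pvCandsB mx := by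
  intro x
  simp only [pvCandsA, pvCandsB, List.mem_flatMap, List.mem_map, PySem.List.mem_pyRange_one]
  constructor
  · rintro ⟨i, hi, j, hj, p, hp, q, hq, rfl⟩
    refine ⟨i-1, by omega, p-1, by omega, j-1, by omega, q-1, by omega, ?_⟩
    rw [show p-1+1 = p from by omega, show q-1+1 = q from by omega]
  · rintro ⟨top, ht, b, hb, j, hj, q, hq, rfl⟩
    refine ⟨top+1, by omega, j+1, by omega, b+1, by omega, q+1, by omega, ?_⟩
    rw [show top+1-1 = top from by omega, show j+1-1 = j from by omega]

-- ===== VERDICT (by name: the statement is the Claim_ definition above) =====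
theorem maxSumSubmatrix2_spec : Claim_equal_maxSumSubmatrix2 := by
  intro matrix k _ _
  unfold Spec_maxSumSubmatrix2
  rw [pvAchar, pvBchar]
  exact pvFoldlStep_ext k _ _ _ (pvCands_ext matrix)
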